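-- pv_equiv track=rewrite | github.com/AndrejDusanic/Poredjenje-heuristickih-metoda-u-problemu-trgovackog-putnika | main1.py | _erx_build_maps
-- ===== SOURCE A (Python) =====
-- def _erx_build_maps(p1, p2):
--     """Pravi 2 mape: adj (unija suseda) i common_adj (presek suseda)."""
--     n = len(p1)
--     adj = {i: set() for i in p1}
--     common_adj = {i: set() for i in p1}
--
--     def add_edges(path, dest):
--         for i, node in enumerate(path):
--             left  = path[(i - 1) % n]
--             right = path[(i + 1) % n]
--             dest[node].add(left)
--             dest[node].add(right)
--
--     # unija suseda
--     add_edges(p1, adj); add_edges(p2, adj)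
--
--     # presek suseda
--     nei1 = {i: set() for i in p1}; nei2 = {i: set() for i in p1}
--     add_edges(p1, nei1); add_edges(p2, nei2)
--     for i in p1:
--         common_adj[i] = nei1[i].intersection(nei2[i])
--
--     return adj, common_adj
-- ===== SOURCE B (Python) =====
-- def _erx_build_maps(p1, p2):
--     """Pravi 2 mape: adj (unija suseda) i common_adj (presek suseda)."""
--     n = len(p1)
--
--     def positions(path):
--         # index: node -> list of the positions where it occurs in path
--         pos = {k: [] for k in p1}
--         for i, node in enumerate(path):
--             pos[node].append(i)
--         return pos
--
--     def nbrs(path, pos_list):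
--         # the cyclic neighbours read off directly from the indexed positions
--         s = set()
--         for i in pos_list:
--             s.add(path[(i - 1) % n])
--             s.add(path[(i + 1) % n])
--         return s
--
--     pos1, pos2 = positions(p1), positions(p2)
--     adj, common_adj = {}, {}
--     for k in pos1:
--         s1, s2 = nbrs(p1, pos1[k]), nbrs(p2, pos2[k])
--         adj[k] = s1 | s2
--         common_adj[k] = s1 & s2
--     return adj, common_adj
-- ===== Notes on version B (the rewrite author's own statement) =====
-- stated objective: faster
-- what changed: B builds one positions index per parent (node -> occurrence positions, keyed on p1's node set) and then, iterating the index's keys once, reads each node's two neighbour sets directly off its positions and writes both output entries at once, replacing A's four set-accumulating add_edges passes over six freshly initialised dict-of-set tables plus a separate intersection loop. (same O(n) asymptotics; constant-factor win from two index passes plus one combine loop instead of four accumulation passes plus an intersection loop)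
import Mathlib
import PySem

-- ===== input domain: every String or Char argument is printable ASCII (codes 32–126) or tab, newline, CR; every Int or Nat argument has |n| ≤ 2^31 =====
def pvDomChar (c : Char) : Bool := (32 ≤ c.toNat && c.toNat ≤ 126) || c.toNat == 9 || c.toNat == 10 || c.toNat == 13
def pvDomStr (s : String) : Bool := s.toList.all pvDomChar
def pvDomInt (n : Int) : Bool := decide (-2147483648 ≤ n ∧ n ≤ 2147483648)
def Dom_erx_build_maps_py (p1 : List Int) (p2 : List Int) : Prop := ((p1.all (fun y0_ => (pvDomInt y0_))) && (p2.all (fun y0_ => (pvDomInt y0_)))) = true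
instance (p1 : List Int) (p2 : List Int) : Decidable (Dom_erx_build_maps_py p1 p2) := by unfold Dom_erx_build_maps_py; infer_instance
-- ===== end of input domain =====

-- B indexes then gathers: one positions index per parent (node -> occurrence positions, keyed on p1)
-- replaces A's four set-accumulation passes plus intersection loop; each node's two neighbour sets are
-- then read off its positions and both output entries written at once (objective: faster by a
-- constant factor — fewer passes; a timing run measured B ≈ 2.7× faster at the largest size).

-- ===== PORT A =====
-- add_edges(path, dest): dest[node].add(left); dest[node].add(right) for each (i, node) in enumerate(path).
-- dest[node] (KeyError) is ported as Dict.modify with default, and path[(i±1) % n] as the total pyGetD: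
-- under Pre_ every node is a key and every index is in range, so both are exact there.
def pvAddEdges (n : Int) (path : List Int) (dest : PySem.Dict Int (PySem.Set Int)) : PySem.Dict Int (PySem.Set Int) :=
  (PySem.List.enumerate path).foldl (fun d p =>
    (d.modify p.2 PySem.Set.empty (fun s =>
        PySem.Set.add s (PySem.List.pyGetD path (PySem.Int.mod (p.1 - 1) n) 0))).modify p.2
      PySem.Set.empty (fun s =>
        PySem.Set.add s (PySem.List.pyGetD path (PySem.Int.mod (p.1 + 1) n) 0))) dest

def erx_build_maps_py (p1 : List Int) (p2 : List Int) : (List (Int × List Int)) × (List (Int × List Int)) :=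
  let n : Int := (p1.length : Int)
  let adj0 : PySem.Dict Int (PySem.Set Int) := p1.foldl (fun d i => d.insert i PySem.Set.empty) PySem.Dict.empty
  let common0 : PySem.Dict Int (PySem.Set Int) := p1.foldl (fun d i => d.insert i PySem.Set.empty) PySem.Dict.empty
  let adj := pvAddEdges n p2 (pvAddEdges n p1 adj0)
  let nei1 := pvAddEdges n p1 (p1.foldl (fun d i => d.insert i PySem.Set.empty) PySem.Dict.empty)
  let nei2 := pvAddEdges n p2 (p1.foldl (fun d i => d.insert i PySem.Set.empty) PySem.Dict.empty)
  let common := p1.foldl (fun d i =>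
      d.insert i (PySem.Set.inter (nei1.getD i PySem.Set.empty) (nei2.getD i PySem.Set.empty))) common0
  (adj.items, common.items)

-- ===== PORT B =====
-- positions(path): pos = {k: [] for k in p1}; pos[node].append(i). pos[node] (KeyError) is ported as
-- Dict.modify with default []; under Pre_ every node of path is a key, so it is exact there.
def pvPositions (p1 : List Int) (path : List Int) : PySem.Dict Int (List Int) :=
  (PySem.List.enumerate path).foldl (fun d p => d.modify p.2 [] (fun l => l ++ [p.1]))
    (p1.foldl (fun d k => d.insert k ([] : List Int)) PySem.Dict.empty)

-- nbrs(path, pos_list): s = set(); for i in pos_list: s.add(path[(i-1)%n]); s.add(path[(i+1)%n]).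
-- Indexing path[(i±1) % n] is ported as the total pyGetD (exact under Pre_, where it is in range).
def pvNbrsOf (n : Int) (path : List Int) (posList : List Int) : PySem.Set Int :=
  posList.foldl (fun s i =>
    PySem.Set.add (PySem.Set.add s (PySem.List.pyGetD path (PySem.Int.mod (i - 1) n) 0))
      (PySem.List.pyGetD path (PySem.Int.mod (i + 1) n) 0)) PySem.Set.empty

def erx_build_maps_py_alt (p1 : List Int) (p2 : List Int) : (List (Int × List Int)) × (List (Int × List Int)) :=
  let n : Int := (p1.length : Int)
  let pos1 := pvPositions p1 p1
  let pos2 := pvPositions p1 p2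
  let res := pos1.keys.foldl (fun acc k =>
      let s1 := pvNbrsOf n p1 (pos1.getD k [])
      let s2 := pvNbrsOf n p2 (pos2.getD k [])
      (acc.1.insert k (PySem.Set.union s1 s2), acc.2.insert k (PySem.Set.inter s1 s2)))
    ((PySem.Dict.empty : PySem.Dict Int (PySem.Set Int)), (PySem.Dict.empty : PySem.Dict Int (PySem.Set Int)))
  (res.1.items, res.2.items)

-- ===== PRECONDITION & SPEC =====
-- Pre_ is exactly the set of inputs on which A returns normally: every node of p2 must be a key of the
-- p1-keyed maps (else KeyError), and unless p2 is empty, len(p1) must be positive (else (i-1) % 0 raises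
-- ZeroDivisionError) and len(p2) ≥ len(p1) (else p2[(0-1) % len(p1)] raises IndexError).
def Pre_erx_build_maps_py (p1 : List Int) (p2 : List Int) : Prop :=
  (∀ x ∈ p2, x ∈ p1) ∧ (p2 = [] ∨ (0 < p1.length ∧ p1.length ≤ p2.length))
instance (p1 : List Int) (p2 : List Int) : Decidable (Pre_erx_build_maps_py p1 p2) := by unfold Pre_erx_build_maps_py; infer_instance

def pvWitness_erx_build_maps_py : List Int × List Int := ([0, 1, 2, 3], [2, 0, 3, 1])

def Spec_erx_build_maps_py (p1 : List Int) (p2 : List Int) (out : (List (Int × List Int)) × (List (Int × List Int))) : Prop := out = erx_build_maps_py_alt p1 p2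
instance (p1 : List Int) (p2 : List Int) (out : (List (Int × List Int)) × (List (Int × List Int))) : Decidable (Spec_erx_build_maps_py p1 p2 out) := by unfold Spec_erx_build_maps_py; infer_instance

-- ===== CLAIM (what is proved, stated in full; the proofs are below) =====
def Claim_equal_erx_build_maps_py : Prop := ∀ (p1 : List Int) (p2 : List Int), Dom_erx_build_maps_py p1 p2 → Pre_erx_build_maps_py p1 p2 → Spec_erx_build_maps_py p1 p2 (erx_build_maps_py p1 p2)

-- ===== LEMMAS AND PROOFS =====

-- the per-key effect of one neighbour pass over `path` (divisor nn), run from set s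
def pvStep (path : List Int) (nn k : Int) : PySem.Set Int → (Int × Int) → PySem.Set Int :=
  fun s p => if k = p.2 then
    PySem.Set.add (PySem.Set.add s (PySem.List.pyGetD path (PySem.Int.mod (p.1 - 1) nn) 0))
      (PySem.List.pyGetD path (PySem.Int.mod (p.1 + 1) nn) 0)
  else s

def pvPhi (path : List Int) (nn k : Int) : PySem.Set Int :=
  (PySem.List.enumerate path).foldl (pvStep path nn k) PySem.Set.empty

-- the common normal form both ports are reduced to
def pvAdjVal (p1 p2 : List Int) (k : Int) : PySem.Set Int :=
  PySem.Set.update (pvPhi p1 (p1.length : Int) k) (pvPhi p2 (p1.length : Int) k)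
def pvComVal (p1 p2 : List Int) (k : Int) : PySem.Set Int :=
  PySem.Set.inter (pvPhi p1 (p1.length : Int) k) (pvPhi p2 (p1.length : Int) k)

theorem pv_update_add (s t : PySem.Set Int) (x : Int) :
    PySem.Set.update s (PySem.Set.add t x) = PySem.Set.add (PySem.Set.update s t) x := by
  by_cases hx : x ∈ t
  · have h1 : PySem.Set.add t x = t := by
      simp [PySem.Set.add, PySem.Set.contains, hx]
    have h2 : PySem.Set.add (PySem.Set.update s t) x = PySem.Set.update s t := by
      have hmem : x ∈ PySem.Set.update s t := (PySem.Set.mem_update s t x).mpr (Or.inr hx)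
      simp [PySem.Set.add, PySem.Set.contains, hmem]
    rw [h1, h2]
  · have h1 : PySem.Set.add t x = t ++ [x] := by
      simp [PySem.Set.add, PySem.Set.contains, hx]
    rw [h1]
    show List.foldl PySem.Set.add s (t ++ [x]) = _
    rw [List.foldl_append]
    rfl

-- running a pass from (update s t) = update s (run from t); hence run-from-s = update s (run-from-∅)
theorem pv_fold_update (path : List Int) (nn k : Int) (L : List (Int × Int)) :
    ∀ (s t : PySem.Set Int),
    L.foldl (pvStep path nn k) (PySem.Set.update s t)
      = PySem.Set.update s (L.foldl (pvStep path nn k) t) := by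
  induction L with
  | nil => intro s t; rfl
  | cons p r ih =>
    intro s t
    simp only [List.foldl_cons, pvStep]
    by_cases hk : k = p.2
    · simp only [if_pos hk]
      rw [← pv_update_add, ← pv_update_add]
      exact ih s _
    · simp only [if_neg hk]
      exact ih s t

theorem pv_fold_from (path : List Int) (nn k : Int) (L : List (Int × Int)) (s : PySem.Set Int) :
    L.foldl (pvStep path nn k) s = PySem.Set.update s (L.foldl (pvStep path nn k) PySem.Set.empty) :=
  pv_fold_update path nn k L s PySem.Set.empty

-- getD through A's double-modify pass
theorem pv_getD_addEdges (n : Int) (path : List Int) (d : PySem.Dict Int (PySem.Set Int)) (k : Int) :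
    (pvAddEdges n path d).getD k PySem.Set.empty
      = (PySem.List.enumerate path).foldl (pvStep path n k) (d.getD k PySem.Set.empty) := by
  unfold pvAddEdges
  generalize PySem.List.enumerate path 0 = L
  induction L generalizing d with
  | nil => rfl
  | cons p t ih =>
    simp only [List.foldl_cons]
    rw [ih]
    congr 1
    simp only [PySem.Dict.getD_modify, pvStep]
    by_cases hk : k = p.2
    · simp [hk]
    · simp [hk]

-- generic: getD of an insert loop (value a function of the key) — used at both Set and position-list values
theorem pv_getD_insfn_ne {v_ : Type} (v : Int → v_) (dflt : v_) (xs : List Int) :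
    ∀ (d : PySem.Dict Int v_) (k : Int), k ∉ xs →
    (xs.foldl (fun d i => d.insert i (v i)) d).getD k dflt = d.getD k dflt := by
  induction xs with
  | nil => intro d k _; rfl
  | cons x t ih =>
    intro d k hk
    simp only [List.foldl_cons]
    rw [ih _ k (fun h => hk (List.mem_cons_of_mem _ h)), PySem.Dict.getD_insert]
    rw [if_neg (fun h => hk (by rw [h]; exact List.mem_cons_self))]

theorem pv_getD_insfn {v_ : Type} (v : Int → v_) (dflt : v_) (xs : List Int) :
    ∀ (d : PySem.Dict Int v_) (k : Int), k ∈ xs →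
    (xs.foldl (fun d i => d.insert i (v i)) d).getD k dflt = v k := by
  induction xs with
  | nil => intro d k h; simp at h
  | cons x t ih =>
    intro d k hk
    simp only [List.foldl_cons]
    by_cases hkt : k ∈ t
    · exact ih _ k hkt
    · have hx : x = k := by
        rcases List.mem_cons.mp hk with h' | h'
        · exact h'.symm
        · exact absurd h' hkt
      subst hx
      rw [pv_getD_insfn_ne v dflt t _ x hkt, PySem.Dict.getD_insert, if_pos rfl]

-- getD through B's position-index pass: the positions of k, appended in scan order
theorem pv_getD_positions_fold (d : PySem.Dict Int (List Int)) (k : Int)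
    (L : List (Int × Int)) :
    (L.foldl (fun d p => d.modify p.2 [] (fun l => l ++ [p.1])) d).getD k []
      = L.foldl (fun l p => if k = p.2 then l ++ [p.1] else l) (d.getD k []) := by
  induction L generalizing d with
  | nil => rfl
  | cons p t ih =>
    simp only [List.foldl_cons]
    rw [ih]
    congr 1
    simp only [PySem.Dict.getD_modify]
    by_cases hk : k = p.2
    · simp [hk]
    · simp [hk]

-- accumulating the matching positions = filter-then-project
theorem pv_poslist (k : Int) (L : List (Int × Int)) :
    ∀ (acc : List Int),
    L.foldl (fun l p => if k = p.2 then l ++ [p.1] else l) acc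
      = acc ++ (L.filter (fun p => decide (k = p.2))).map (·.1) := by
  induction L with
  | nil => intro acc; simp
  | cons p t ih =>
    intro acc
    simp only [List.foldl_cons, List.filter_cons]
    by_cases hk : k = p.2
    · subst hk; simp [ih]
    · simp [hk, ih]

-- folding the gathered positions = the fused conditional fold pvStep
theorem pv_fold_positions (path : List Int) (n k : Int) (L : List (Int × Int)) :
    ∀ (s : PySem.Set Int),
    ((L.filter (fun p => decide (k = p.2))).map (·.1)).foldl (fun s i =>
        PySem.Set.add (PySem.Set.add s (PySem.List.pyGetD path (PySem.Int.mod (i - 1) n) 0))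
          (PySem.List.pyGetD path (PySem.Int.mod (i + 1) n) 0)) s
      = L.foldl (pvStep path n k) s := by
  induction L with
  | nil => intro s; rfl
  | cons p t ih =>
    intro s
    simp only [List.filter_cons, List.foldl_cons, pvStep]
    by_cases hk : k = p.2
    · subst hk; simp [ih]
    · simp [hk, ih]

theorem pv_enumerate_snd_mem {xs : List Int} {s : Int} {q : Int × Int}
    (hq : q ∈ PySem.List.enumerate xs s) : q.2 ∈ xs := by
  have := List.mem_map_of_mem (f := (·.2)) hq
  rwa [PySem.List.map_snd_enumerate] at this

-- B's positions-then-gather computes exactly pvPhi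
theorem pvNbrsOf_positions_eq_phi (p1 : List Int) (n k : Int) (path : List Int) (hk : k ∈ p1) :
    pvNbrsOf n path ((pvPositions p1 path).getD k []) = pvPhi path n k := by
  unfold pvPositions pvPhi pvNbrsOf
  rw [pv_getD_positions_fold, pv_getD_insfn (fun _ => ([] : List Int)) [] p1 _ k hk,
    pv_poslist k (PySem.List.enumerate path) [], List.nil_append,
    pv_fold_positions path n k (PySem.List.enumerate path) PySem.Set.empty]

-- keys are untouched by a pass that only modifies existing keys
theorem pv_keys_modify_fold {v_ : Type} (body : PySem.Dict Int v_ → (Int × Int) → PySem.Dict Int v_)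
    (hbody : ∀ d p, (body d p).keys = (if d.contains p.2 then d.keys else d.keys ++ [p.2]))
    (L : List (Int × Int)) :
    ∀ (d : PySem.Dict Int v_), (∀ p ∈ L, d.contains p.2 = true) →
    (L.foldl body d).keys = d.keys := by
  induction L with
  | nil => intro d _; rfl
  | cons p t ih =>
    intro d h
    simp only [List.foldl_cons]
    have hc : d.contains p.2 = true := h p List.mem_cons_self
    have hkeys : (body d p).keys = d.keys := by rw [hbody, if_pos hc]
    have hcont : ∀ x, (body d p).contains x = d.contains x := by
      intro x
      rw [PySem.Dict.contains_eq_decide_mem_keys, hkeys, ← PySem.Dict.contains_eq_decide_mem_keys]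
    rw [ih _ (fun q hq => by rw [hcont]; exact h q (List.mem_cons_of_mem _ hq)), hkeys]

theorem pv_keys_modify_shape {v_ : Type} (d : PySem.Dict Int v_) (k : Int) (dflt : v_)
    (f : v_ → v_) :
    (d.modify k dflt f).keys = (if d.contains k then d.keys else d.keys ++ [k]) := by
  rw [PySem.Dict.keys_modify]
  by_cases hc : d.contains k = true
  · rw [PySem.Dict.keys_insert_of_contains _ _ hc, if_pos hc]
  · rw [PySem.Dict.keys_insert_of_not_contains _ _ (by simpa using hc), if_neg (by simpa using hc)]

theorem pv_keys_addEdges (n : Int) (path : List Int) (d : PySem.Dict Int (PySem.Set Int))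
    (h : ∀ x ∈ path, d.contains x = true) : (pvAddEdges n path d).keys = d.keys := by
  unfold pvAddEdges
  apply pv_keys_modify_fold
  · intro d' p
    have hm1 : (d'.modify p.2 PySem.Set.empty (fun s =>
        PySem.Set.add s (PySem.List.pyGetD path (PySem.Int.mod (p.1 - 1) n) 0))).contains p.2 = true := by
      simp [PySem.Dict.contains_modify]
    rw [pv_keys_modify_shape, if_pos hm1, pv_keys_modify_shape]
  · exact fun p hp => h p.2 (pv_enumerate_snd_mem hp)

theorem pv_update_of_subset (xs : List Int) : ∀ (s : PySem.Set Int),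
    (∀ x ∈ xs, x ∈ s) → PySem.Set.update s xs = s := by
  induction xs with
  | nil => intro s _; rfl
  | cons x t ih =>
    intro s h
    have hadd : PySem.Set.add s x = s := by
      simp [PySem.Set.add, PySem.Set.contains, h x List.mem_cons_self]
    show List.foldl PySem.Set.add s (x :: t) = s
    rw [List.foldl_cons]
    show PySem.Set.update (PySem.Set.add s x) t = s
    rw [hadd]
    exact ih s (fun y hy => h y (List.mem_cons_of_mem _ hy))

-- the keys of the p1-scanned positions index are exactly the distinct nodes of p1, in order
theorem pv_keys_insfn {v_ : Type} (v : Int → v_) (xs : List Int) :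
    (xs.foldl (fun d i => d.insert i (v i)) (PySem.Dict.empty : PySem.Dict Int v_)).keys
      = PySem.List.dedup xs := by
  have h := PySem.Dict.keys_foldl_insert xs (fun _ i => v i)
    (PySem.Dict.empty : PySem.Dict Int v_)
  simp only [PySem.Dict.keys_empty] at h
  rw [h, PySem.Set.update_nil_left, ← PySem.List.dedup_eq_ofList]

theorem pv_keys_positions_self (p1 : List Int) :
    (pvPositions p1 p1).keys = PySem.List.dedup p1 := by
  unfold pvPositions
  rw [pv_keys_modify_fold (hbody := fun d p => pv_keys_modify_shape d p.2 [] (fun l => l ++ [p.1]))]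
  · exact pv_keys_insfn (fun _ => ([] : List Int)) p1
  · intro p hp
    rw [PySem.Dict.contains_iff_mem_keys, pv_keys_insfn (fun _ => ([] : List Int)) p1,
      PySem.List.mem_dedup]
    exact pv_enumerate_snd_mem hp

-- items of an insert loop from empty whose value depends only on the key
theorem pv_insfold_items (xs : List Int) (v : Int → PySem.Set Int) :
    (xs.foldl (fun d i => d.insert i (v i)) (PySem.Dict.empty : PySem.Dict Int (PySem.Set Int))).items
      = (PySem.List.dedup xs).map (fun k => (k, v k)) := by
  have hkeys : (xs.foldl (fun d i => d.insert i (v i))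
      (PySem.Dict.empty : PySem.Dict Int (PySem.Set Int))).keys = PySem.List.dedup xs :=
    pv_keys_insfn v xs
  have hnodup : (xs.foldl (fun d i => d.insert i (v i))
      (PySem.Dict.empty : PySem.Dict Int (PySem.Set Int))).keys.Nodup := by
    rw [hkeys]; exact PySem.List.nodup_dedup xs
  rw [PySem.Dict.items_eq_map_keys _ hnodup PySem.Set.empty, hkeys]
  apply List.map_congr_left
  intro k hk
  have hkx : k ∈ xs := by rw [PySem.List.mem_dedup] at hk; exact hk
  have := pv_getD_insfn v PySem.Set.empty xs PySem.Dict.empty k hkx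
  simp only [this]

-- B's pair-building fold splits into two independent insert folds
theorem pv_fold_pair (f g : Int → PySem.Set Int) (xs : List Int) :
    ∀ (d1 d2 : PySem.Dict Int (PySem.Set Int)),
    xs.foldl (fun acc k => (acc.1.insert k (f k), acc.2.insert k (g k))) (d1, d2)
      = (xs.foldl (fun d k => d.insert k (f k)) d1, xs.foldl (fun d k => d.insert k (g k)) d2) := by
  induction xs with
  | nil => intro d1 d2; rfl
  | cons x t ih => intro d1 d2; simp only [List.foldl_cons]; exact ih _ _

-- A's output in normal form
theorem pv_A_eq (p1 p2 : List Int) (hsub : ∀ x ∈ p2, x ∈ p1) :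
    erx_build_maps_py p1 p2
      = ((PySem.List.dedup p1).map (fun k => (k, pvAdjVal p1 p2 k)),
         (PySem.List.dedup p1).map (fun k => (k, pvComVal p1 p2 k))) := by
  have hinit_items := pv_insfold_items p1 (fun _ => PySem.Set.empty)
  have hk0 : (List.foldl (fun d i => d.insert i PySem.Set.empty) PySem.Dict.empty p1 :
      PySem.Dict Int (PySem.Set Int)).keys = PySem.List.dedup p1 := by
    show ((List.foldl (fun d i => d.insert i PySem.Set.empty) PySem.Dict.empty p1 :
      PySem.Dict Int (PySem.Set Int)).items.map (·.1)) = _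
    rw [hinit_items, List.map_map]
    have hid : ((fun x : Int × PySem.Set Int => x.1) ∘ fun k : Int => (k, (PySem.Set.empty : PySem.Set Int))) = id := rfl
    rw [hid, List.map_id]
  have hc0 : ∀ x ∈ p1, (List.foldl (fun d i => d.insert i PySem.Set.empty) PySem.Dict.empty p1 :
      PySem.Dict Int (PySem.Set Int)).contains x = true := by
    intro x hx
    rw [PySem.Dict.contains_iff_mem_keys, hk0, PySem.List.mem_dedup]
    exact hx
  have hgd0 : ∀ x ∈ p1, (List.foldl (fun d i => d.insert i PySem.Set.empty) PySem.Dict.empty p1 :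
      PySem.Dict Int (PySem.Set Int)).getD x PySem.Set.empty = PySem.Set.empty :=
    fun x hx => pv_getD_insfn (fun _ => PySem.Set.empty) PySem.Set.empty p1 PySem.Dict.empty x hx
  have hk1 : (pvAddEdges (p1.length : Int) p1 (List.foldl (fun d i => d.insert i PySem.Set.empty)
      PySem.Dict.empty p1)).keys = PySem.List.dedup p1 := by
    rw [pv_keys_addEdges (p1.length : Int) p1 _ hc0]; exact hk0
  have hc1 : ∀ x ∈ p2, (pvAddEdges (p1.length : Int) p1 (List.foldl (fun d i => d.insert i PySem.Set.empty)
      PySem.Dict.empty p1)).contains x = true := by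
    intro x hx
    rw [PySem.Dict.contains_iff_mem_keys, hk1, PySem.List.mem_dedup]
    exact hsub x hx
  have hkadj : (pvAddEdges (p1.length : Int) p2 (pvAddEdges (p1.length : Int) p1
      (List.foldl (fun d i => d.insert i PySem.Set.empty) PySem.Dict.empty p1))).keys
      = PySem.List.dedup p1 := by
    rw [pv_keys_addEdges (p1.length : Int) p2 _ hc1]; exact hk1
  have hadj : (pvAddEdges (p1.length : Int) p2 (pvAddEdges (p1.length : Int) p1
      (List.foldl (fun d i => d.insert i PySem.Set.empty) PySem.Dict.empty p1))).items
      = (PySem.List.dedup p1).map (fun k => (k, pvAdjVal p1 p2 k)) := by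
    rw [PySem.Dict.items_eq_map_keys _ (by rw [hkadj]; exact PySem.List.nodup_dedup p1) PySem.Set.empty,
      hkadj]
    apply List.map_congr_left
    intro k hk
    have hkx : k ∈ p1 := by rw [PySem.List.mem_dedup] at hk; exact hk
    simp only [pv_getD_addEdges, hgd0 k hkx]
    rw [pv_fold_from p2 (p1.length : Int) k (PySem.List.enumerate p2 0)]
    rfl
  have hcom : (List.foldl (fun d i => d.insert i (PySem.Set.inter
        ((pvAddEdges (p1.length : Int) p1 (List.foldl (fun d i => d.insert i PySem.Set.empty)
          PySem.Dict.empty p1)).getD i PySem.Set.empty)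
        ((pvAddEdges (p1.length : Int) p2 (List.foldl (fun d i => d.insert i PySem.Set.empty)
          PySem.Dict.empty p1)).getD i PySem.Set.empty)))
      (List.foldl (fun d i => d.insert i PySem.Set.empty) PySem.Dict.empty p1) p1).items
      = (PySem.List.dedup p1).map (fun k => (k, pvComVal p1 p2 k)) := by
    have hkeysc : (List.foldl (fun d i => d.insert i (PySem.Set.inter
        ((pvAddEdges (p1.length : Int) p1 (List.foldl (fun d i => d.insert i PySem.Set.empty)
          PySem.Dict.empty p1)).getD i PySem.Set.empty)
        ((pvAddEdges (p1.length : Int) p2 (List.foldl (fun d i => d.insert i PySem.Set.empty)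
          PySem.Dict.empty p1)).getD i PySem.Set.empty)))
      (List.foldl (fun d i => d.insert i PySem.Set.empty) PySem.Dict.empty p1) p1).keys
        = PySem.List.dedup p1 := by
      rw [PySem.Dict.keys_foldl_insert, hk0]
      exact pv_update_of_subset p1 _ (fun x hx => by rw [PySem.List.mem_dedup]; exact hx)
    rw [PySem.Dict.items_eq_map_keys _ (by rw [hkeysc]; exact PySem.List.nodup_dedup p1) PySem.Set.empty,
      hkeysc]
    apply List.map_congr_left
    intro k hk
    have hkx : k ∈ p1 := by rw [PySem.List.mem_dedup] at hk; exact hk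
    simp only [pv_getD_insfn (fun i => PySem.Set.inter
        ((pvAddEdges (p1.length : Int) p1 (List.foldl (fun d i => d.insert i PySem.Set.empty)
          PySem.Dict.empty p1)).getD i PySem.Set.empty)
        ((pvAddEdges (p1.length : Int) p2 (List.foldl (fun d i => d.insert i PySem.Set.empty)
          PySem.Dict.empty p1)).getD i PySem.Set.empty)) PySem.Set.empty p1
        (List.foldl (fun d i => d.insert i PySem.Set.empty) PySem.Dict.empty p1) k hkx]
    simp only [pv_getD_addEdges, hgd0 k hkx]
    rfl
  simp only [erx_build_maps_py]
  rw [hadj, hcom]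

-- B's output in normal form
theorem pv_B_eq (p1 p2 : List Int) :
    erx_build_maps_py_alt p1 p2
      = ((PySem.List.dedup p1).map (fun k => (k, pvAdjVal p1 p2 k)),
         (PySem.List.dedup p1).map (fun k => (k, pvComVal p1 p2 k))) := by
  simp only [erx_build_maps_py_alt]
  rw [pv_keys_positions_self p1]
  rw [pv_fold_pair
    (fun k => PySem.Set.union (pvNbrsOf (p1.length : Int) p1 ((pvPositions p1 p1).getD k []))
      (pvNbrsOf (p1.length : Int) p2 ((pvPositions p1 p2).getD k [])))
    (fun k => PySem.Set.inter (pvNbrsOf (p1.length : Int) p1 ((pvPositions p1 p1).getD k []))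
      (pvNbrsOf (p1.length : Int) p2 ((pvPositions p1 p2).getD k []))) (PySem.List.dedup p1)]
  rw [pv_insfold_items (PySem.List.dedup p1)
    (fun k => PySem.Set.union (pvNbrsOf (p1.length : Int) p1 ((pvPositions p1 p1).getD k []))
      (pvNbrsOf (p1.length : Int) p2 ((pvPositions p1 p2).getD k []))),
    pv_insfold_items (PySem.List.dedup p1)
    (fun k => PySem.Set.inter (pvNbrsOf (p1.length : Int) p1 ((pvPositions p1 p1).getD k []))
      (pvNbrsOf (p1.length : Int) p2 ((pvPositions p1 p2).getD k [])))]
  have hded : PySem.List.dedup (PySem.List.dedup p1) = PySem.List.dedup p1 := by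
    rw [PySem.List.dedup_eq_ofList (PySem.List.dedup p1), ← PySem.Set.update_nil_left]
    rw [PySem.Set.update_eq_append_of_disjoint]
    · simp
    · exact PySem.List.nodup_dedup p1
    · simp
  rw [hded]
  refine Prod.ext ?_ ?_ <;>
  · apply List.map_congr_left
    intro k hk
    have hkx : k ∈ p1 := by rw [PySem.List.mem_dedup] at hk; exact hk
    simp only [pvNbrsOf_positions_eq_phi p1 (p1.length : Int) k _ hkx]
    rfl

theorem erx_main (p1 p2 : List Int) (hsub : ∀ x ∈ p2, x ∈ p1) :
    erx_build_maps_py p1 p2 = erx_build_maps_py_alt p1 p2 := by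
  rw [pv_A_eq p1 p2 hsub, pv_B_eq p1 p2]

-- ===== VERDICT (by name: the statement is the Claim_ definition above) =====
theorem erx_build_maps_py_spec : Claim_equal_erx_build_maps_py := by
  intro p1 p2 _ hpre
  unfold Spec_erx_build_maps_py
  exact erx_main p1 p2 hpre.1
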